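-- pv_equiv track=rewrite | github.com/onero/CTF-NC3 | reversing/nissehalla/scripts/solve_collision.py | get_visited_indices
-- ===== SOURCE A (Python) =====
-- def get_visited_indices(length):
--     # Initial parameters
--     # r9 is initialized at 180b (Wait, r9 is used in 1808 'add r13, r9' BEFORE update?)
--     # Let's check init of r9.
--     # 180b: lea r9, [r9 + 4*r9 + 3] is in the loop.
--     # Where is r9 set BEFORE the loop?
--     # At 1608: lea r9, [rip+0xbc1] (SALT_BYTES).
--     # Then loop 1640 uses r9.
--     # Then loop 1760 uses r9.
--     # AFTER those loops, before 1802: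
--     # 17a6: movabs rax, ...
--     # ...
--     # 17d1: sub r9, rax (Wait, r9 was r15 (len) in 17b0: mov r9, r15).
--     # 17b0: mov r9, r15
--     # ...
--     # 17d4: add r9, 1
--     # So initial r9 = (Calculated from length)
--
--     # 17b3: mul r15 (rax = 0x2492492492492493 * len)
--     # 17b6: mov rax, r15
--     # 17b9: sub rax, rdx
--     # 17bc: shr rax, 1
--     # 17bf: add rdx, rax
--     # 17c2: shr rdx, 2
--     # rdx = len // 7  (0x249... is 1/7 approx fixed point)
--     # 17c6: lea rax, [8*rdx]
--     # 17ce: sub rax, rdx (rax = 7 * (len//7))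
--     # 17d1: sub r9, rax (r9 = len - 7*(len//7) = len % 7)
--     # 17d4: add r9, 1  (r9 = (len % 7) + 1)
--
--     step = (length % 7) + 1
--     curr = 0
--     visited = set()
--
--     # Loop structure simulation
--     # The code jumps to Body (1821) first.
--     # Then updates (1808).
--
--     while True:
--         # Body (1821)
--         visited.add(curr)
--
--         # Check (18d2)
--         if (curr & 3) == 0:
--             # Inner loop logic
--             # Accesses curr, curr+1, curr+2 (if < length)
--             # Logic:
--             # r14 starts at curr
--             # It loops 3 times (r12d=0,1,2)
--             # But inside:
--             # cmp r14, length; jae update_block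
--             # add r14, 1
--             # access input[r14] (Wait, input[r14] AFTER increment?)
--             # Re-read:
--             # 18eb: mov rax, r14
--             # 18f0: add r14, 1
--             # 18f4: div r15 (rdx = rax % r15 = old_r14 % length)
--             # Wait, div uses RDX:RAX.
--             # 18ee: xor edx, edx
--             # So RDX:RAX is 0:old_r14.
--             # rdx becomes old_r14 % length.
--             # 18f7: access input[rdx]
--             # So it accesses input[old_r14].
--             # Iter 0: old_r14 = curr. Access input[curr]. (Already visited)
--             # Iter 1: old_r14 = curr+1. Access input[curr+1].
--             # Iter 2: old_r14 = curr+2. Access input[curr+2].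
--
--             # The Bounds Check 18e2: cmp r14, r15; jae update_block.
--             # Iter 0: r14=curr. Safe (curr < length).
--             # Iter 1: r14=curr+1. Check bounds. If >= length, abort inner loop.
--             # Iter 2: r14=curr+2. Check bounds. If >= length, abort.
--
--             if curr + 1 < length:
--                 visited.add(curr + 1)
--                 if curr + 2 < length:
--                     visited.add(curr + 2)
--
--         # Update Block (1808)
--         curr += step
--
--         # Update step (r9)
--         # 180b: lea r9, [r9 + 4*r9 + 3] -> r9 = 5*r9 + 3
--         # 1810: and r9d, 7
--         # 1814: add r9, 1
--         step = ((5 * step + 3) & 7) + 1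
--
--         if curr >= length:
--             break
--
--     return visited
-- ===== SOURCE B (Python) =====
-- def get_visited_indices(length):
--     # The step-update map s -> ((5*s+3)&7)+1 is an involution on its reachable
--     # values, so the walk's steps simply alternate between two precomputed values.
--     sa = (length % 7) + 1
--     sb = ((5 * sa + 3) & 7) + 1
--     # pass 1: collect the walk's main positions (do-while, so 0 is always there)
--     positions = []
--     curr = 0
--     while True:
--         positions.append(curr)
--         curr += sa
--         sa, sb = sb, sa
--         if curr >= length:
--             break
--     # pass 2: expand each position into the indices the inner loop visits
--     visited = set()
--     for p in positions:
--         visited.add(p)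
--         if (p & 3) == 0 and p + 1 < length:
--             visited.add(p + 1)
--             if p + 2 < length:
--                 visited.add(p + 2)
--     return visited
-- ===== Notes on version B (the rewrite author's own statement) =====
-- stated objective: alternative
-- what changed: B exploits that the step-update map ((5s+3)&7)+1 is an involution, so it precomputes the two alternating step values once instead of recomputing the map every iteration, and splits the work into two passes: one collecting the walk's main positions, one expanding each position into its visited neighbors.
import Mathlib
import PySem

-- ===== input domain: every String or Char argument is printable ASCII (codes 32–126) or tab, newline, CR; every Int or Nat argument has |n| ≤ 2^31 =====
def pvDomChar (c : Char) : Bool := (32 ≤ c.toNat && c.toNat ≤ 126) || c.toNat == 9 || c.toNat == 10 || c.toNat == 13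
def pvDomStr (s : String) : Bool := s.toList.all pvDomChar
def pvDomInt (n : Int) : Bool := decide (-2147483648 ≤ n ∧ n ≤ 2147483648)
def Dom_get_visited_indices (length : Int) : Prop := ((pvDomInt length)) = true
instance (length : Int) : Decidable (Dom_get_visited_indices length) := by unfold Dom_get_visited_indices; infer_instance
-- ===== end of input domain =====

-- B precomputes the two alternating step values (the step map is an involution) and
-- splits A's single walk into two passes: collect positions, then expand neighbors.

-- ===== PORT A =====
-- the loop of A, carrying (curr, step, visited); the proof argument 1 ≤ step only
-- makes the recursion total, it does not change the computation
def pvWalkA (length curr step : Int) (hs : 1 ≤ step) (visited : PySem.Set Int) : PySem.Set Int :=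
  -- Body (1821): visited.add(curr), then the nested neighbor checks
  let v := PySem.Set.add visited curr
  let v :=
    if PySem.Int.band curr 3 = 0 then
      if curr + 1 < length then
        let v := PySem.Set.add v (curr + 1)
        if curr + 2 < length then PySem.Set.add v (curr + 2) else v
      else v
    else v
  -- Update block: curr += step; step = ((5*step+3)&7)+1; break when curr >= length
  if h : length ≤ curr + step then v
  else
    pvWalkA length (curr + step) (PySem.Int.band (5 * step + 3) 7 + 1)
      (by have := PySem.Int.band_nonneg_of_nonneg_left (a := 5 * step + 3) 7 (by omega); omega) v
termination_by (length - curr).toNat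
decreasing_by omega

def get_visited_indices (length : Int) : List Int :=
  pvWalkA length 0 (PySem.Int.mod length 7 + 1)
    (by have := PySem.Int.mod_nonneg length (b := 7) (by norm_num); omega)
    PySem.Set.empty

-- ===== PORT B =====
-- the step-update map of the walk
def pvStepMap (s : Int) : Int := PySem.Int.band (5 * s + 3) 7 + 1

theorem pvStepMap_pos (s : Int) (h : 1 ≤ s) : 1 ≤ pvStepMap s := by
  have := PySem.Int.band_nonneg_of_nonneg_left (a := 5 * s + 3) 7 (by omega)
  unfold pvStepMap; omega

-- pass 1: the walk's main positions, stepping alternately by sa and sb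
def pvWalkB (length curr sa sb : Int) (ha : 1 ≤ sa) (hb : 1 ≤ sb) : List Int :=
  if _h : length ≤ curr + sa then [curr]
  else curr :: pvWalkB length (curr + sa) sb sa hb ha
termination_by (length - curr).toNat
decreasing_by omega

-- pass 2 body: expand one position into the indices it visits
def pvExpand (length : Int) (v : PySem.Set Int) (p : Int) : PySem.Set Int :=
  let v := PySem.Set.add v p
  if PySem.Int.band p 3 = 0 ∧ p + 1 < length then
    let v := PySem.Set.add v (p + 1)
    if p + 2 < length then PySem.Set.add v (p + 2) else v
  else v

def get_visited_indices_alt (length : Int) : List Int :=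
  let sa := PySem.Int.mod length 7 + 1
  have ha : 1 ≤ sa := by have := PySem.Int.mod_nonneg length (b := 7) (by norm_num); omega
  (pvWalkB length 0 sa (pvStepMap sa) ha (pvStepMap_pos sa ha)).foldl (pvExpand length)
    PySem.Set.empty

-- ===== PRECONDITION & SPEC =====
def Spec_get_visited_indices (length : Int) (out : List Int) : Prop := out = get_visited_indices_alt length
instance (length : Int) (out : List Int) : Decidable (Spec_get_visited_indices length out) := by unfold Spec_get_visited_indices; infer_instance

-- ===== CLAIM (what is proved, stated in full; the proofs are below) =====
def Claim_equal_get_visited_indices : Prop := ∀ (length : Int), Dom_get_visited_indices length → Spec_get_visited_indices length (get_visited_indices length)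

-- ===== LEMMAS AND PROOFS =====

-- A's body and B's pass-2 body compute the same set
theorem pvExpand_eq_body (length p : Int) (v : PySem.Set Int) :
    pvExpand length v p =
      (let v1 := PySem.Set.add v p
       if PySem.Int.band p 3 = 0 then
         if p + 1 < length then
           let v2 := PySem.Set.add v1 (p + 1)
           if p + 2 < length then PySem.Set.add v2 (p + 2) else v2
         else v1
       else v1) := by
  unfold pvExpand
  by_cases h1 : PySem.Int.band p 3 = 0 <;> by_cases h2 : p + 1 < length <;>
    simp [h1, h2]

-- congruence in the step argument, through the proof arguments
theorem pvWalkA_congr (length c s s' : Int) (h : 1 ≤ s) (h' : 1 ≤ s') (v : PySem.Set Int)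
    (e : s = s') : pvWalkA length c s h v = pvWalkA length c s' h' v := by subst e; rfl

theorem pvWalkB_congr (length c sa sb sb' : Int) (ha : 1 ≤ sa) (hb : 1 ≤ sb) (hb' : 1 ≤ sb')
    (e : sb = sb') : pvWalkB length c sa sb ha hb = pvWalkB length c sa sb' ha hb' := by
  subst e; rfl

-- the walk with step recomputation equals the fold of the alternating-step walk
theorem pvWalk_eq (length : Int) : ∀ (n : Nat) (curr sa sb : Int),
    (length - curr).toNat = n → pvStepMap sa = sb → pvStepMap sb = sa →
    ∀ (ha : 1 ≤ sa) (hb : 1 ≤ sb) (v : PySem.Set Int),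
    pvWalkA length curr sa ha v = (pvWalkB length curr sa sb ha hb).foldl (pvExpand length) v := by
  intro n
  induction n using Nat.strong_induction_on with
  | _ n ih =>
    intro curr sa sb hn hab hba ha hb v
    rw [pvWalkA, pvWalkB]
    by_cases h : length ≤ curr + sa
    · simp only [dif_pos h, List.foldl_cons, List.foldl_nil, pvExpand_eq_body]
    · simp only [dif_neg h, List.foldl_cons]
      rw [← pvExpand_eq_body]
      have hsb' : 1 ≤ pvStepMap sb := hba ▸ ha
      rw [pvWalkB_congr length (curr + sa) sb sa (pvStepMap sb) hb ha hsb' hba.symm]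
      rw [pvWalkA_congr length (curr + sa) (PySem.Int.band (5 * sa + 3) 7 + 1) sb _
            hb (pvExpand length v curr) hab]
      exact ih (length - (curr + sa)).toNat (by omega) (curr + sa) sb (pvStepMap sb) rfl rfl
        (by rw [hba, hab]) hb hsb' (pvExpand length v curr)

-- the step map is an involution on the values the walk can start from
theorem pvStepMap_invol (length : Int) :
    pvStepMap (pvStepMap (PySem.Int.mod length 7 + 1)) = PySem.Int.mod length 7 + 1 := by
  have h1 : 0 ≤ PySem.Int.mod length 7 := PySem.Int.mod_nonneg length (b := 7) (by norm_num)
  have h2 : PySem.Int.mod length 7 < 7 := PySem.Int.mod_lt length (b := 7) (by norm_num)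
  generalize PySem.Int.mod length 7 = r at h1 h2
  interval_cases r <;> decide

-- ===== VERDICT (by name: the statement is the Claim_ definition above) =====
theorem get_visited_indices_spec : Claim_equal_get_visited_indices := by
  intro length _
  unfold Spec_get_visited_indices get_visited_indices get_visited_indices_alt
  exact pvWalk_eq length (length - 0).toNat 0 _ _ rfl rfl (pvStepMap_invol length) _ _ _
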